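-- pv_equiv track=rewrite | github.com/singhneha5/ai_rag | streamlit_app.py | diversify_results_by_source
-- ===== SOURCE A (Python) =====
-- def diversify_results_by_source(results, sources, max_per_source=1, target_k=None):
--     if target_k is None:
--         target_k = len(results)
--
--     selected_indices = set()
--     source_counts = {}
--     diverse_results = []
--     diverse_sources = []
--
--     for i, (result, source) in enumerate(zip(results, sources)):
--         if source_counts.get(source, 0) < max_per_source:
--             diverse_results.append(result)
--             diverse_sources.append(source)
--             source_counts[source] = source_counts.get(source, 0) + 1
--             selected_indices.add(i)
--         if len(diverse_results) >= target_k: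
--             break
--
--     for i, (result, source) in enumerate(zip(results, sources)):
--         if len(diverse_results) >= target_k:
--             break
--         if i in selected_indices:
--             continue
--         diverse_results.append(result)
--         diverse_sources.append(source)
--
--     return diverse_results, diverse_sources
-- ===== SOURCE B (Python) =====
-- def diversify_results_by_source(results, sources, max_per_source=1, target_k=None):
--     k = len(results) if target_k is None else target_k
--     counts = {}
--     kept = []
--     overflow = []
--     for pair in zip(results, sources):
--         src = pair[1]
--         c = counts.get(src, 0)
--         if c < max_per_source:
--             counts[src] = c + 1
--             kept.append(pair)
--         else:
--             overflow.append(pair)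
--     chosen = (kept + overflow)[:max(k, 0)]
--     return [r for r, _ in chosen], [s for _, s in chosen]
-- ===== Notes on version B (the rewrite author's own statement) =====
-- stated objective: simpler
-- what changed: Single pass partitions (result, source) pairs into kept/overflow lists with a running per-source count, then returns (kept+overflow) truncated to target_k; the second rescan and the selected_indices set disappear.
-- intended difference: When target_k <= 0 with nonempty results/sources and max_per_source >= 1, A's append-before-break overshoot returns one item (the first result/source pair) although zero were requested; B returns ([], []), the intended value for a non-positive target_k. — e.g. on diversify_results_by_source(["a"], ["x"], 1, some 0): A returns (["a"], ["x"]), B returns ([], [])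
import Mathlib
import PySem

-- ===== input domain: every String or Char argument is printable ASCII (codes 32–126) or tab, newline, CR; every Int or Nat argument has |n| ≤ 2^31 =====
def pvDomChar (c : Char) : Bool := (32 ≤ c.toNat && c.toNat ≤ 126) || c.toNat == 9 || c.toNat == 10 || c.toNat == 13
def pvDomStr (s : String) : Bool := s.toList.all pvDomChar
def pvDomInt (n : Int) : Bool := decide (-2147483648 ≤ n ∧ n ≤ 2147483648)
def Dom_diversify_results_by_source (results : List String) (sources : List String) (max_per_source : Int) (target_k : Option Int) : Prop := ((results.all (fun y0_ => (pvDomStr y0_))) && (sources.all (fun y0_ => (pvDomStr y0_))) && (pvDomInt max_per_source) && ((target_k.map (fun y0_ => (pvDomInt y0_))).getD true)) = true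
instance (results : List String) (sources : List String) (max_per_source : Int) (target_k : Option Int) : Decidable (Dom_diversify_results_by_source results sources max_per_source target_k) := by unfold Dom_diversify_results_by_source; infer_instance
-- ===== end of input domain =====

-- B replaces A's two scans plus selected-index set by one partition pass and a final truncation;
-- on the degenerate target_k ≤ 0 corner (see D_ below) B returns ([], []) where A returns one item.

-- ===== PORT A =====
-- first loop: for i, (result, source) in enumerate(zip(results, sources)), per-source cap, break at target_k
def pvAPass1 (max_per_source target_k : Int) :
    List (String × String) → Int → PySem.Dict String Int → PySem.Set Int →
    List String → List String → PySem.Set Int × List String × List String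
  | [], _, _, sel, dr, ds => (sel, dr, ds)
  | (r, s) :: rest, i, counts, sel, dr, ds =>
    if counts.getD s 0 < max_per_source then
      if ((dr ++ [r]).length : Int) ≥ target_k then
        (PySem.Set.add sel i, dr ++ [r], ds ++ [s])
      else
        pvAPass1 max_per_source target_k rest (i + 1)
          (counts.insert s (counts.getD s 0 + 1)) (PySem.Set.add sel i) (dr ++ [r]) (ds ++ [s])
    else
      if (dr.length : Int) ≥ target_k then (sel, dr, ds)
      else pvAPass1 max_per_source target_k rest (i + 1) counts sel dr ds

-- second loop: refill from indices not in selected_indices until target_k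
def pvAPass2 (target_k : Int) :
    List (String × String) → Int → PySem.Set Int → List String → List String →
    List String × List String
  | [], _, _, dr, ds => (dr, ds)
  | (r, s) :: rest, i, sel, dr, ds =>
    if (dr.length : Int) ≥ target_k then (dr, ds)
    else if PySem.Set.contains sel i then pvAPass2 target_k rest (i + 1) sel dr ds
    else pvAPass2 target_k rest (i + 1) sel (dr ++ [r]) (ds ++ [s])

def diversify_results_by_source (results : List String) (sources : List String) (max_per_source : Int) (target_k : Option Int) : List String × List String :=
  let tk := target_k.getD (results.length : Int)
  let z := results.zip sources
  let st := pvAPass1 max_per_source tk z 0 PySem.Dict.empty PySem.Set.empty [] []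
  pvAPass2 tk z 0 st.1 st.2.1 st.2.2

-- ===== PORT B =====
-- one pass: partition the zipped pairs into kept (per-source count still below the cap) and overflow
def pvBPartition (max_per_source : Int) :
    List (String × String) → PySem.Dict String Int → List (String × String) → List (String × String) →
    List (String × String) × List (String × String)
  | [], _, kept, ov => (kept, ov)
  | p :: rest, counts, kept, ov =>
    if counts.getD p.2 0 < max_per_source then
      pvBPartition max_per_source rest (counts.insert p.2 (counts.getD p.2 0 + 1)) (kept ++ [p]) ov
    else
      pvBPartition max_per_source rest counts kept (ov ++ [p])

def diversify_results_by_source_alt (results : List String) (sources : List String) (max_per_source : Int) (target_k : Option Int) : List String × List String :=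
  let k := target_k.getD (results.length : Int)
  let kv := pvBPartition max_per_source (results.zip sources) PySem.Dict.empty [] []
  let chosen := (kv.1 ++ kv.2).take (max k 0).toNat
  (chosen.map Prod.fst, chosen.map Prod.snd)

-- ===== PRECONDITION & SPEC =====
-- On target_k ≤ 0 with nonempty results and sources and max_per_source ≥ 1, A appends the first pair
-- before its break check and returns one item although none were requested; B returns ([], []), the
-- intended value for a non-positive target_k.
def D_diversify_results_by_source (results : List String) (sources : List String) (max_per_source : Int) (target_k : Option Int) : Prop :=
  target_k.getD 1 ≤ 0 ∧ results ≠ [] ∧ sources ≠ [] ∧ 1 ≤ max_per_source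
instance (results : List String) (sources : List String) (max_per_source : Int) (target_k : Option Int) : Decidable (D_diversify_results_by_source results sources max_per_source target_k) := by unfold D_diversify_results_by_source; infer_instance

def Spec_diversify_results_by_source (results : List String) (sources : List String) (max_per_source : Int) (target_k : Option Int) (out : List String × List String) : Prop := ¬ D_diversify_results_by_source results sources max_per_source target_k → out = diversify_results_by_source_alt results sources max_per_source target_k
instance (results : List String) (sources : List String) (max_per_source : Int) (target_k : Option Int) (out : List String × List String) : Decidable (Spec_diversify_results_by_source results sources max_per_source target_k out) := by unfold Spec_diversify_results_by_source; infer_instance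

def pvDiffWitness_diversify_results_by_source : List String × List String × Int × Option Int := (["a"], ["x"], 1, some 0)
def pvDiffWitnessOut_diversify_results_by_source : (List String × List String) × (List String × List String) := ((["a"], ["x"]), ([], []))

-- ===== CLAIM (what is proved, stated in full; the proofs are below) =====
def Claim_unchanged_diversify_results_by_source : Prop := ∀ (results : List String) (sources : List String) (max_per_source : Int) (target_k : Option Int), Dom_diversify_results_by_source results sources max_per_source target_k → Spec_diversify_results_by_source results sources max_per_source target_k (diversify_results_by_source results sources max_per_source target_k)
def Claim_changed_diversify_results_by_source : Prop := Dom_diversify_results_by_source (pvDiffWitness_diversify_results_by_source.1) (pvDiffWitness_diversify_results_by_source.2.1) (pvDiffWitness_diversify_results_by_source.2.2.1) (pvDiffWitness_diversify_results_by_source.2.2.2) ∧ D_diversify_results_by_source (pvDiffWitness_diversify_results_by_source.1) (pvDiffWitness_diversify_results_by_source.2.1) (pvDiffWitness_diversify_results_by_source.2.2.1) (pvDiffWitness_diversify_results_by_source.2.2.2) ∧ diversify_results_by_source (pvDiffWitness_diversify_results_by_source.1) (pvDiffWitness_diversify_results_by_source.2.1) (pvDiffWitness_diversify_results_by_source.2.2.1)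 (pvDiffWitness_diversify_results_by_source.2.2.2) = pvDiffWitnessOut_diversify_results_by_source.1 ∧ diversify_results_by_source_alt (pvDiffWitness_diversify_results_by_source.1) (pvDiffWitness_diversify_results_by_source.2.1) (pvDiffWitness_diversify_results_by_source.2.2.1) (pvDiffWitness_diversify_results_by_source.2.2.2) = pvDiffWitnessOut_diversify_results_by_source.2 ∧ pvDiffWitnessOut_diversify_results_by_source.1 ≠ pvDiffWitnessOut_diversify_results_by_source.2
def Claim_exact_diversify_results_by_source : Prop := ∀ (results : List String) (sources : List String) (max_per_source : Int) (target_k : Option Int), Dom_diversify_results_by_source results sources max_per_source target_k → D_diversify_results_by_source results sources max_per_source target_k → diversify_results_by_source results sources max_per_source target_k ≠ diversify_results_by_source_alt results sources max_per_source target_k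

-- ===== LEMMAS AND PROOFS =====

-- pvBPartition with accumulators = the accumulators ++ the partition started empty
theorem pvBPartition_acc (mp : Int) : ∀ (l : List (String × String)) (counts : PySem.Dict String Int)
    (kept ov : List (String × String)),
    pvBPartition mp l counts kept ov =
      (kept ++ (pvBPartition mp l counts [] []).1, ov ++ (pvBPartition mp l counts [] []).2) := by
  intro l
  induction l with
  | nil => intro counts kept ov; simp [pvBPartition]
  | cons p rest ih =>
    intro counts kept ov
    simp only [pvBPartition]
    by_cases h : counts.getD p.2 0 < mp
    · simp only [if_pos h]
      rw [ih _ (kept ++ [p]) ov, ih _ ([] ++ [p]) []]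
      simp
    · simp only [if_neg h]
      rw [ih _ kept (ov ++ [p]), ih _ [] ([] ++ [p])]
      simp

theorem pvBPartition_cons_kept (mp : Int) (p : String × String) (rest : List (String × String))
    (counts : PySem.Dict String Int) (h : counts.getD p.2 0 < mp) :
    pvBPartition mp (p :: rest) counts [] [] =
      (p :: (pvBPartition mp rest (counts.insert p.2 (counts.getD p.2 0 + 1)) [] []).1,
       (pvBPartition mp rest (counts.insert p.2 (counts.getD p.2 0 + 1)) [] []).2) := by
  conv_lhs => rw [pvBPartition]
  rw [if_pos h, pvBPartition_acc]
  simp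

theorem pvBPartition_cons_ov (mp : Int) (p : String × String) (rest : List (String × String))
    (counts : PySem.Dict String Int) (h : ¬ counts.getD p.2 0 < mp) :
    pvBPartition mp (p :: rest) counts [] [] =
      ((pvBPartition mp rest counts [] []).1,
       p :: (pvBPartition mp rest counts [] []).2) := by
  conv_lhs => rw [pvBPartition]
  rw [if_neg h, pvBPartition_acc]
  simp

-- indices below the running index are in pass1's selected set iff they are in the initial one
theorem pvAPass1_sel_lt (mp tk : Int) : ∀ (l : List (String × String)) (i : Int)
    (counts : PySem.Dict String Int) (sel : PySem.Set Int) (dr ds : List String) (j : Int), j < i →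
    (j ∈ (pvAPass1 mp tk l i counts sel dr ds).1 ↔ j ∈ sel) := by
  intro l
  induction l with
  | nil => intros; simp [pvAPass1]
  | cons p rest ih =>
    intro i counts sel dr ds j hj
    obtain ⟨r, s⟩ := p
    simp only [pvAPass1]
    have hne : j ≠ i := by omega
    by_cases h1 : counts.getD s 0 < mp
    · by_cases h2 : ((dr ++ [r]).length : Int) ≥ tk
      · simp only [if_pos h1, if_pos h2]
        rw [PySem.Set.mem_add]
        tauto
      · simp only [if_pos h1, if_neg h2]
        rw [ih (i+1) _ _ _ _ j (by omega), PySem.Set.mem_add]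
        tauto
    · by_cases h2 : ((dr.length : Int) ≥ tk)
      · simp [if_neg h1, if_pos h2]
      · simp only [if_neg h1, if_neg h2]
        exact ih (i+1) _ _ _ _ j (by omega)

theorem pvAPass1_sel_mono (mp tk : Int) : ∀ (l : List (String × String)) (i : Int)
    (counts : PySem.Dict String Int) (sel : PySem.Set Int) (dr ds : List String) (j : Int), j ∈ sel →
    j ∈ (pvAPass1 mp tk l i counts sel dr ds).1 := by
  intro l
  induction l with
  | nil => intro i counts sel dr ds j hj; simpa [pvAPass1] using hj
  | cons p rest ih =>
    intro i counts sel dr ds j hj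
    obtain ⟨r, s⟩ := p
    simp only [pvAPass1]
    by_cases h1 : counts.getD s 0 < mp
    · by_cases h2 : ((dr ++ [r]).length : Int) ≥ tk
      · simp only [if_pos h1, if_pos h2]
        rw [PySem.Set.mem_add]; exact Or.inl hj
      · simp only [if_pos h1, if_neg h2]
        exact ih _ _ _ _ _ j (by rw [PySem.Set.mem_add]; exact Or.inl hj)
    · by_cases h2 : ((dr.length : Int) ≥ tk)
      · simpa [if_neg h1, if_pos h2] using hj
      · simp only [if_neg h1, if_neg h2]
        exact ih _ _ _ _ _ j hj

-- pass1's lists: the accumulators extended by the kept part of the partition, truncated at target_k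
theorem pvAPass1_out (mp tk : Int) : ∀ (l : List (String × String)) (i : Int)
    (counts : PySem.Dict String Int) (sel : PySem.Set Int) (dr ds : List String),
    (dr.length : Int) < tk →
    (pvAPass1 mp tk l i counts sel dr ds).2 =
      (dr ++ ((pvBPartition mp l counts [] []).1.map Prod.fst).take (tk - dr.length).toNat,
       ds ++ ((pvBPartition mp l counts [] []).1.map Prod.snd).take (tk - dr.length).toNat) := by
  intro l
  induction l with
  | nil => intro i counts sel dr ds h; simp [pvAPass1, pvBPartition]
  | cons p rest ih =>
    intro i counts sel dr ds h
    obtain ⟨r, s⟩ := p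
    simp only [pvAPass1]
    by_cases h1 : counts.getD s 0 < mp
    · rw [pvBPartition_cons_kept mp (r, s) rest counts h1]
      by_cases h2 : ((dr ++ [r]).length : Int) ≥ tk
      · simp only [if_pos h1, if_pos h2]
        have hm : (tk - (dr.length : Int)).toNat = 1 := by
          simp only [List.length_append, List.length_cons, List.length_nil] at h2
          push_cast at h2
          omega
        simp [hm]
      · simp only [if_pos h1, if_neg h2]
        rw [ih (i+1) _ _ _ _ (by omega)]
        have hm : (tk - (dr.length : Int)).toNat = (tk - (((dr ++ [r]).length : Nat) : Int)).toNat + 1 := by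
          simp only [List.length_append, List.length_cons, List.length_nil]
          push_cast
          push_cast at h2
          omega
        simp [hm]
    · rw [pvBPartition_cons_ov mp (r, s) rest counts h1]
      simp only [if_neg h1, if_neg (show ¬ ((dr.length : Int) ≥ tk) by omega)]
      exact ih (i+1) _ _ _ _ h

-- pass2 returns immediately once the list is full
theorem pvAPass2_ge (tk : Int) (l : List (String × String)) (i : Int) (sel : PySem.Set Int)
    (dr ds : List String) (h : (dr.length : Int) ≥ tk) :
    pvAPass2 tk l i sel dr ds = (dr, ds) := by
  cases l with
  | nil => rfl
  | cons p rest =>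
    obtain ⟨r, s⟩ := p
    simp [pvAPass2, if_pos h]

theorem pvSet_contains_iff (s : PySem.Set Int) (i : Int) :
    PySem.Set.contains s i = true ↔ i ∈ s := by
  simp [pysem]

-- the refill pass appends the overflow part of the partition, truncated at target_k
theorem pvAPass2_eq (mp tk : Int) : ∀ (l : List (String × String)) (i : Int)
    (counts : PySem.Dict String Int) (sel : PySem.Set Int) (dr ds dr2 ds2 : List String),
    (∀ j : Int, i ≤ j → j ∉ sel) →
    (((pvAPass1 mp tk l i counts sel dr ds).2.1.length : Int) < tk) →
    pvAPass2 tk l i (pvAPass1 mp tk l i counts sel dr ds).1 dr2 ds2 =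
      (dr2 ++ ((pvBPartition mp l counts [] []).2.map Prod.fst).take (tk - dr2.length).toNat,
       ds2 ++ ((pvBPartition mp l counts [] []).2.map Prod.snd).take (tk - dr2.length).toNat) := by
  intro l
  induction l with
  | nil =>
    intro i counts sel dr ds dr2 ds2 _ _
    simp [pvAPass2, pvBPartition]
  | cons p rest ih =>
    intro i counts sel dr ds dr2 ds2 hsel hnb
    obtain ⟨r, s⟩ := p
    by_cases h1 : counts.getD s 0 < mp
    · by_cases h2 : ((dr ++ [r]).length : Int) ≥ tk
      · exfalso
        have hval : (pvAPass1 mp tk ((r, s) :: rest) i counts sel dr ds).2.1 = dr ++ [r] := by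
          simp only [pvAPass1]
          rw [if_pos h1, if_pos h2]
        rw [hval] at hnb
        omega
      · have hstep : pvAPass1 mp tk ((r, s) :: rest) i counts sel dr ds
            = pvAPass1 mp tk rest (i + 1) (counts.insert s (counts.getD s 0 + 1))
                (PySem.Set.add sel i) (dr ++ [r]) (ds ++ [s]) := by
          simp only [pvAPass1]
          rw [if_pos h1, if_neg h2]
        rw [hstep] at hnb ⊢
        rw [pvBPartition_cons_kept mp (r, s) rest counts h1]
        by_cases h3 : (dr2.length : Int) ≥ tk
        · rw [pvAPass2_ge tk _ i _ dr2 ds2 h3]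
          have hz : (tk - (dr2.length : Int)).toNat = 0 := by omega
          simp [hz]
        · have hi : i ∈ (pvAPass1 mp tk rest (i + 1) (counts.insert s (counts.getD s 0 + 1))
              (PySem.Set.add sel i) (dr ++ [r]) (ds ++ [s])).1 := by
            apply pvAPass1_sel_mono
            rw [PySem.Set.mem_add]
            exact Or.inr rfl
          have hc : PySem.Set.contains (pvAPass1 mp tk rest (i + 1) (counts.insert s (counts.getD s 0 + 1))
              (PySem.Set.add sel i) (dr ++ [r]) (ds ++ [s])).1 i = true := (pvSet_contains_iff _ _).mpr hi
          simp only [pvAPass2]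
          rw [if_neg h3, if_pos hc]
          apply ih
          · intro j hj
            rw [PySem.Set.mem_add]
            rintro (hmem | rfl)
            · exact hsel j (by omega) hmem
            · omega
          · exact hnb
    · by_cases h2 : ((dr.length : Int) ≥ tk)
      · exfalso
        have hval : (pvAPass1 mp tk ((r, s) :: rest) i counts sel dr ds).2.1 = dr := by
          simp only [pvAPass1]
          rw [if_neg h1, if_pos h2]
        rw [hval] at hnb
        omega
      · have hstep : pvAPass1 mp tk ((r, s) :: rest) i counts sel dr ds
            = pvAPass1 mp tk rest (i + 1) counts sel dr ds := by
          simp only [pvAPass1]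
          rw [if_neg h1, if_neg h2]
        rw [hstep] at hnb ⊢
        rw [pvBPartition_cons_ov mp (r, s) rest counts h1]
        by_cases h3 : (dr2.length : Int) ≥ tk
        · rw [pvAPass2_ge tk _ i _ dr2 ds2 h3]
          have hz : (tk - (dr2.length : Int)).toNat = 0 := by omega
          simp [hz]
        · have hni : i ∉ (pvAPass1 mp tk rest (i + 1) counts sel dr ds).1 := by
            rw [pvAPass1_sel_lt mp tk rest (i + 1) counts sel dr ds i (by omega)]
            exact hsel i (by omega)
          have hc : ¬ (PySem.Set.contains (pvAPass1 mp tk rest (i + 1) counts sel dr ds).1 i = true) :=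
            fun h => hni ((pvSet_contains_iff _ _).mp h)
          have hsel' : ∀ j : Int, i + 1 ≤ j → j ∉ sel := fun j hj => hsel j (by omega)
          simp only [pvAPass2]
          rw [if_neg h3, if_neg hc]
          rw [ih (i + 1) counts sel dr ds (dr2 ++ [r]) (ds2 ++ [s]) hsel' hnb]
          have hm : (tk - (dr2.length : Int)).toNat = (tk - (((dr2 ++ [r]).length : Nat) : Int)).toNat + 1 := by
            simp only [List.length_append, List.length_cons, List.length_nil]
            push_cast
            omega
          simp [hm]
  
-- the two programs agree whenever target_k ≥ 1, or the zip is empty, or nothing can be kept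
theorem pvMain (mp t : Int) (z : List (String × String))
    (hcase : 1 ≤ t ∨ (t ≤ 0 ∧ (z = [] ∨ mp ≤ 0))) :
    pvAPass2 t z 0 (pvAPass1 mp t z 0 PySem.Dict.empty PySem.Set.empty [] []).1
        (pvAPass1 mp t z 0 PySem.Dict.empty PySem.Set.empty [] []).2.1
        (pvAPass1 mp t z 0 PySem.Dict.empty PySem.Set.empty [] []).2.2 =
      ((((pvBPartition mp z PySem.Dict.empty [] []).1 ++ (pvBPartition mp z PySem.Dict.empty [] []).2).take (max t 0).toNat).map Prod.fst,
       (((pvBPartition mp z PySem.Dict.empty [] []).1 ++ (pvBPartition mp z PySem.Dict.empty [] []).2).take (max t 0).toNat).map Prod.snd) := by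
  rcases hcase with ht | ⟨ht, hz⟩
  · -- main path: target_k ≥ 1
    have hmax : max t 0 = t := by omega
    have hout := pvAPass1_out mp t z 0 PySem.Dict.empty PySem.Set.empty [] [] (by simp; omega)
    have h1 : (pvAPass1 mp t z 0 PySem.Dict.empty PySem.Set.empty [] []).2.1
        = ((pvBPartition mp z PySem.Dict.empty [] []).1.map Prod.fst).take t.toNat := by
      rw [hout]; simp
    have h2 : (pvAPass1 mp t z 0 PySem.Dict.empty PySem.Set.empty [] []).2.2
        = ((pvBPartition mp z PySem.Dict.empty [] []).1.map Prod.snd).take t.toNat := by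
      rw [hout]; simp
    set K := (pvBPartition mp z PySem.Dict.empty [] []).1 with hK
    set V := (pvBPartition mp z PySem.Dict.empty [] []).2 with hV
    by_cases hKlen : ((K.length : Nat) : Int) ≥ t
    · -- the cap-respecting part alone already fills target_k
      have htle : t.toNat ≤ K.length := by omega
      have hfull : (((pvAPass1 mp t z 0 PySem.Dict.empty PySem.Set.empty [] []).2.1.length : Nat) : Int) ≥ t := by
        rw [h1]
        simp only [List.length_take, List.length_map]
        omega
      rw [pvAPass2_ge t z 0 _ _ _ hfull, h1, h2, hmax]
      rw [List.map_take, List.map_take, List.map_append, List.map_append]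
      rw [List.take_append_of_le_length (by simpa using htle),
          List.take_append_of_le_length (by simpa using htle)]
    · -- the cap-respecting part is short: the second pass refills from the overflow
      have hklt : K.length < t.toNat := by omega
      have h1' : (pvAPass1 mp t z 0 PySem.Dict.empty PySem.Set.empty [] []).2.1 = K.map Prod.fst := by
        rw [h1]; exact List.take_of_length_le (by simp; omega)
      have h2' : (pvAPass1 mp t z 0 PySem.Dict.empty PySem.Set.empty [] []).2.2 = K.map Prod.snd := by
        rw [h2]; exact List.take_of_length_le (by simp; omega)
      rw [h1', h2']
      rw [pvAPass2_eq mp t z 0 PySem.Dict.empty PySem.Set.empty [] [] (K.map Prod.fst) (K.map Prod.snd)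
        (by intro j _ hj; simp [PySem.Set.empty] at hj)
        (by rw [h1']; simp; omega)]
      have hKV : (K ++ V).take t.toNat = K ++ V.take (t.toNat - K.length) := by
        rw [List.take_append, List.take_of_length_le (by omega)]
      have hc1 : (t - ((K.map (Prod.fst (α := String) (β := String))).length : Int)).toNat = t.toNat - K.length := by
        simp only [List.length_map]
        omega
      rw [hmax, hKV, hc1]
      simp [List.map_take, hV]
  · -- degenerate: target_k ≤ 0 and either no pairs or a non-positive cap
    have hmax : (max t 0).toNat = 0 := by omega
    rcases hz with rfl | hmp
    · simp [pvAPass1, pvAPass2, pvBPartition, hmax]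
    · cases z with
      | nil => simp [pvAPass1, pvAPass2, pvBPartition, hmax]
      | cons p rest =>
        obtain ⟨r, s⟩ := p
        have hnk : ¬ (PySem.Dict.empty.getD s 0 < mp) := by
          simp [pysem]; omega
        have hst : pvAPass1 mp t ((r, s) :: rest) 0 PySem.Dict.empty PySem.Set.empty [] []
            = (PySem.Set.empty, [], []) := by
          simp only [pvAPass1]
          rw [if_neg hnk]
          split_ifs with h
          · rfl
          · exfalso
            simp at h
            omega
        rw [hst]
        rw [pvAPass2_ge t _ 0 _ _ _ (by simp; omega)]
        simp [hmax]

-- ===== VERDICT (by name: the statement is the Claim_ definition above) =====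
theorem diversify_results_by_source_spec : Claim_unchanged_diversify_results_by_source := by
  unfold Claim_unchanged_diversify_results_by_source
  intro results sources mp tk _hDom
  unfold Spec_diversify_results_by_source
  intro hnD
  unfold D_diversify_results_by_source at hnD
  simp only [diversify_results_by_source, diversify_results_by_source_alt]
  apply pvMain
  cases tk with
  | none =>
    simp only [Option.getD]
    by_cases hr : results = []
    · subst hr; right; exact ⟨by simp, Or.inl rfl⟩
    · left
      have : results.length ≠ 0 := by simpa [List.length_eq_zero_iff] using hr
      omega
  | some t =>
    simp only [Option.getD]
    by_cases hle : t ≤ 0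
    · right
      refine ⟨hle, ?_⟩
      by_cases hr : results = []
      · subst hr; exact Or.inl rfl
      · by_cases hs : sources = []
        · subst hs; exact Or.inl (List.zip_nil_right)
        · right
          simp only [Option.getD] at hnD
          by_contra hmp
          exact hnD ⟨hle, hr, hs, by omega⟩
    · left; omega

theorem diversify_results_by_source_changed : Claim_changed_diversify_results_by_source := by
  unfold Claim_changed_diversify_results_by_source; decide

theorem diversify_results_by_source_tight : Claim_exact_diversify_results_by_source := by
  unfold Claim_exact_diversify_results_by_source
  rintro results sources mp tk _ ⟨h0, h1, h2, h3⟩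
  cases results with
  | nil => exact absurd rfl h1
  | cons r rs =>
    cases sources with
    | nil => exact absurd rfl h2
    | cons s ss =>
      cases tk with
      | none => simp at h0
      | some t =>
        simp only [Option.getD] at h0
        have hkeep : PySem.Dict.empty.getD s 0 < mp := by
          have hz : PySem.Dict.empty.getD s (0 : Int) = 0 := rfl
          rw [hz]
          omega
        have hA : diversify_results_by_source (r :: rs) (s :: ss) mp (some t) = ([r], [s]) := by
          simp only [diversify_results_by_source, Option.getD, List.zip_cons_cons]
          have hst : pvAPass1 mp t ((r, s) :: rs.zip ss) 0 PySem.Dict.empty PySem.Set.empty [] []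
              = (PySem.Set.add PySem.Set.empty 0, [r], [s]) := by
            simp only [pvAPass1]
            rw [if_pos hkeep]
            split_ifs with h
            · rfl
            · exfalso
              simp at h
              omega
          rw [hst]
          exact pvAPass2_ge t _ 0 _ _ _ (by simp; omega)
        have hB : diversify_results_by_source_alt (r :: rs) (s :: ss) mp (some t) = ([], []) := by
          simp only [diversify_results_by_source_alt, Option.getD]
          have : (max t 0).toNat = 0 := by omega
          simp [this]
        rw [hA, hB]
        simp
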